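-- pv_equiv track=rewrite | github.com/SPC-Facility-EMBL-Hamburg/eSPC_biophysics_platform | circularDichroismApp/appFiles/ChiraKit/python_src/get_dssp_summary.py | split_beta_sheet
-- ===== SOURCE A (Python) =====
-- def split_beta_sheet(lst):
--
--     """
--     Given a list of strings, if there are subsequences of consecutive elements equal to 'Beta-sheet',
--     replace the first and last ocurrence with 'Beta-d' and the middle ones with 'Beta-r'
--     If the sequence length of 'Beta-sheet's is less than 3 elements, replace all of them with 'Beta-d'
--
--     Return the modified list
--     """
--
--     count_b = 0
--
--     lst = [ 'Beta-d' if l == 'Beta-sheet' else l for l in lst ]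
--
--     lst.append('.')
--
--     for i in range(len(lst)-1):
--
--         if lst[i] == 'Beta-d':
--             count_b += 1
--
--             if count_b > 2 and lst[i+1] != 'Beta-d':
--                 # Replace the first two and last two 'Alpha-d's with 'Alpha-r's
--
--                 init = i-count_b+2
--                 end  = i
--
--                 lst[init:end] = ['Beta-r'] * (end-init)
--
--                 count_b = 0
--
--         else:
--
--             count_b = 0
--
--     return lst[:-1]
-- ===== SOURCE B (Python) =====
-- def split_beta_sheet(lst):
--     out = []
--     i = 0
--     n = len(lst)
--     while i < n:
--         if lst[i] in ('Beta-sheet', 'Beta-d'):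
--             j = i
--             while j < n and lst[j] in ('Beta-sheet', 'Beta-d'):
--                 j += 1
--             L = j - i
--             if L < 3:
--                 out.extend(['Beta-d'] * L)
--             else:
--                 out.append('Beta-d')
--                 out.extend(['Beta-r'] * (L - 2))
--                 out.append('Beta-d')
--             i = j
--         else:
--             out.append(lst[i])
--             i += 1
--     return out
-- ===== Notes on version B (the rewrite author's own statement) =====
-- stated objective: simpler
-- what changed: A maps 'Beta-sheet' to 'Beta-d', appends a '.' sentinel, and patches run interiors in place via slice assignment driven by a running counter; B does one run-collecting pass that groups maximal runs of beta elements and emits each run's output directly into a fresh list, with no sentinel, counter or in-place mutation.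
import Mathlib
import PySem

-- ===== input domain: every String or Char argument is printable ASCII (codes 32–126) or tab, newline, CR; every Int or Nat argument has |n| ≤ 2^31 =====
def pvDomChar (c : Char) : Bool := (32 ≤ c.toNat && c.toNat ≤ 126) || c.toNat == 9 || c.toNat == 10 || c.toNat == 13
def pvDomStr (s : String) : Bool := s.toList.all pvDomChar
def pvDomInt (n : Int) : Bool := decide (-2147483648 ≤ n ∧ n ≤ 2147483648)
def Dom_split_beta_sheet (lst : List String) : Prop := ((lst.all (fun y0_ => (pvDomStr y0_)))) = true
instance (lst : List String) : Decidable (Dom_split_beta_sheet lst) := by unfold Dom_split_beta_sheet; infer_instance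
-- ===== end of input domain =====

-- B rewrites A's sentinel-and-slice-assignment index loop as a single run-collecting pass
-- that builds a fresh output list (objective: simpler; neither version mutates the caller's list).

-- ===== PORT A =====
-- 'Beta-d' if l == 'Beta-sheet' else l
def fA (l : String) : String := if l == "Beta-sheet" then "Beta-d" else l

-- lst[a:b] = v for a step-1 slice: exact port of Python slice assignment
-- (take up to the clamped start, insert v, resume at the clamped stop, never before the start).
def setSlice (xs : List String) (a b : Int) (v : List String) : List String :=
  let a' := PySem.List.clampIdx xs.length a
  let b' := max a' (PySem.List.clampIdx xs.length b)
  xs.take a' ++ v ++ xs.drop b'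

-- one iteration of A's for-loop body; state = (lst, count_b)
def stepA (st : List String × Int) (i : Int) : List String × Int :=
  let L := st.1
  let cb := st.2
  if PySem.List.pyGetD L i "" == "Beta-d" then
    let cb := cb + 1
    if cb > 2 && !(PySem.List.pyGetD L (i + 1) "" == "Beta-d") then
      let init := i - cb + 2
      let e := i
      (setSlice L init e (List.replicate (e - init).toNat "Beta-r"), 0)
    else (L, cb)
  else (L, 0)

def split_beta_sheet (lst : List String) : List String :=
  let l1 := lst.map fA
  let l2 := l1 ++ ["."]
  let st := (PySem.List.pyRange 0 ((l2.length : Int) - 1) 1).foldl stepA (l2, (0 : Int))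
  PySem.List.slice st.1 none (some (-1))

-- ===== PORT B =====
-- x in ('Beta-sheet', 'Beta-d')
def isBcls (x : String) : Bool := x == "Beta-sheet" || x == "Beta-d"

-- B's outer while-loop: each step consumes one maximal run (the inner while is the takeWhile count)
def altGo : List String → List String
  | [] => []
  | x :: xs =>
    if isBcls x then
      let r := 1 + (xs.takeWhile isBcls).length
      (if r < 3 then List.replicate r "Beta-d"
       else "Beta-d" :: (List.replicate (r - 2) "Beta-r" ++ ["Beta-d"])) ++ altGo (xs.drop (r - 1))
    else x :: altGo xs
termination_by l => l.length
decreasing_by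
  · simp only [List.length_drop, List.length_cons]; omega
  · simp only [List.length_cons]; omega

def split_beta_sheet_alt (lst : List String) : List String := altGo lst

-- ===== PRECONDITION & SPEC =====
def Spec_split_beta_sheet (lst : List String) (out : List String) : Prop := out = split_beta_sheet_alt lst
instance (lst : List String) (out : List String) : Decidable (Spec_split_beta_sheet lst out) := by unfold Spec_split_beta_sheet; infer_instance

-- ===== CLAIM (what is proved, stated in full; the proofs are below) =====
def Claim_equal_split_beta_sheet : Prop := ∀ (lst : List String), Dom_split_beta_sheet lst → Spec_split_beta_sheet lst (split_beta_sheet lst)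

-- ===== LEMMAS AND PROOFS =====

-- getD plumbing
theorem pvGetD_append_left {α : Type} (xs ys : List α) (j : Nat) (d : α) (h : j < xs.length) :
    (xs ++ ys).getD j d = xs.getD j d := by
  simp [List.getD_eq_getElem?_getD, List.getElem?_append_left h]

theorem pvGetD_append_right {α : Type} (xs ys : List α) (j : Nat) (d : α) (h : xs.length ≤ j) :
    (xs ++ ys).getD j d = ys.getD (j - xs.length) d := by
  simp [List.getD_eq_getElem?_getD, List.getElem?_append_right h]

theorem pvGetD_take {α : Type} (xs : List α) (n j : Nat) (d : α) (h : j < n) :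
    (xs.take n).getD j d = xs.getD j d := by
  simp [List.getD_eq_getElem?_getD, h]

theorem pvGetD_drop {α : Type} (xs : List α) (n j : Nat) (d : α) :
    (xs.drop n).getD j d = xs.getD (n + j) d := by
  simp [List.getD_eq_getElem?_getD, List.getElem?_drop]

theorem pvGetD_replicate {α : Type} (n j : Nat) (a d : α) (h : j < n) :
    (List.replicate n a).getD j d = a := by
  simp [List.getD_eq_getElem?_getD, h]

theorem pvGetD_ge {α : Type} (l : List α) (j : Nat) (d : α) (h : l.length ≤ j) :
    l.getD j d = d := by
  simp [List.getD_eq_getElem?_getD, List.getElem?_eq_none h]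

-- takeWhile facts
theorem pvTW_le {α : Type} (p : α → Bool) (xs : List α) : (xs.takeWhile p).length ≤ xs.length := by
  induction xs with
  | nil => simp
  | cons x xs ih =>
    by_cases h : p x <;> simp [h] <;> omega

theorem pvTW_true {α : Type} (p : α → Bool) (xs : List α) (k : Nat) (d : α)
    (h : k < (xs.takeWhile p).length) : p (xs.getD k d) = true := by
  induction xs generalizing k with
  | nil => simp at h
  | cons x xs ih =>
    by_cases hp : p x
    · cases k with
      | zero => simpa using hp
      | succ k =>
        simp only [List.takeWhile_cons, hp, if_true, List.length_cons] at h
        simpa using ih (k := k) (by omega)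
    · simp [hp] at h

theorem pvTW_stop {α : Type} (p : α → Bool) (xs : List α) (d : α)
    (h : (xs.takeWhile p).length < xs.length) :
    p (xs.getD (xs.takeWhile p).length d) = false := by
  induction xs with
  | nil => simp at h
  | cons x xs ih =>
    by_cases hp : p x
    · simp only [List.takeWhile_cons, hp, if_true, List.length_cons] at h ⊢
      simpa using ih (by omega)
    · simp [hp]

-- altGo preserves length
theorem altGo_length (l : List String) : (altGo l).length = l.length := by
  induction l using altGo.induct with
  | case1 => simp [altGo]
  | case2 x xs h r ih =>
    have hr : r = 1 + (xs.takeWhile isBcls).length := rfl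
    have htw := pvTW_le isBcls xs
    rw [altGo]
    simp only [h, if_true]
    rw [← hr]
    have hd : (List.drop (r - 1) xs).length = xs.length - (r - 1) := by simp
    split_ifs with h3 <;>
      simp only [List.length_append, List.length_cons, List.length_replicate,
        List.length_nil, ih, hd] <;> omega
  | case3 x xs h ih =>
    rw [altGo]
    simp [h, ih]

-- pointwise characterisation of altGo's output
theorem altGo_getD (l : List String) (j : Nat) (hj : j < l.length) :
    (altGo l).getD j "" =
      if isBcls (l.getD j "") then
        (if decide (0 < j) && isBcls (l.getD (j-1) "") && decide (j+1 < l.length) && isBcls (l.getD (j+1) "")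
         then "Beta-r" else "Beta-d")
      else l.getD j "" := by
  induction l using altGo.induct generalizing j with
  | case1 => simp at hj
  | case2 x xs h r ih =>
    have hr : r = 1 + (xs.takeWhile isBcls).length := rfl
    have htw := pvTW_le isBcls xs
    have hrun : ∀ k, k < r → isBcls ((x :: xs).getD k "") = true := by
      intro k hk
      cases k with
      | zero => simpa using h
      | succ k =>
        rw [List.getD_cons_succ]
        exact pvTW_true isBcls xs k "" (by omega)
    have hstop : r < (x :: xs).length → isBcls ((x :: xs).getD r "") = false := by
      intro hlt
      have : r = (xs.takeWhile isBcls).length + 1 := by omega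
      rw [this, List.getD_cons_succ]
      exact pvTW_stop isBcls xs "" (by simp at hlt; omega)
    have hheadlen : (if r < 3 then List.replicate r "Beta-d"
        else "Beta-d" :: (List.replicate (r-2) "Beta-r" ++ ["Beta-d"])).length = r := by
      split_ifs with h3 <;> simp <;> omega
    rw [altGo]
    simp only [h, if_true]
    rw [← hr]
    by_cases hjr : j < r
    · rw [pvGetD_append_left _ _ _ _ (by rw [hheadlen]; exact hjr)]
      rw [if_pos (hrun j hjr)]
      have hint : (decide (0 < j) && isBcls ((x :: xs).getD (j-1) "") &&
          decide (j+1 < (x :: xs).length) && isBcls ((x :: xs).getD (j+1) "")) =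
          (decide (0 < j) && decide (j+1 < r)) := by
        by_cases h1 : j + 1 < r
        · have h2 := hrun (j+1) h1
          have h4 := hrun (j-1) (by omega)
          have h3 : j + 1 < (x :: xs).length := by simp; omega
          rw [h2, h4, decide_eq_true h3, decide_eq_true h1]
          simp
        · have h1' : j + 1 = r := by omega
          rw [decide_eq_false h1]
          by_cases hrl : r < (x :: xs).length
          · have hs := hstop hrl
            rw [← h1'] at hs
            rw [hs]
            simp
          · have h3 : ¬ (j + 1 < (x :: xs).length) := by omega
            rw [decide_eq_false h3]
            simp
      rw [hint]
      split_ifs with h3 hc hc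
      · -- short run, condition true: impossible
        exfalso
        simp at hc
        omega
      · -- short run: whole head is Beta-d
        exact pvGetD_replicate _ _ _ _ hjr
      · -- long run, interior
        rcases j with _ | k
        · simp at hc
        rw [List.getD_cons_succ]
        have hk : k < r - 2 := by simp at hc; omega
        rw [pvGetD_append_left _ _ _ _ (by simpa using hk)]
        exact pvGetD_replicate _ _ _ _ hk
      · -- long run, boundary
        rcases j with _ | k
        · simp
        · rw [List.getD_cons_succ]
          have hk' : r - 2 ≤ k := by simp at hc; omega
          rw [pvGetD_append_right _ _ _ _ (by simpa using hk')]
          have hk0 : k - (List.replicate (r-2) "Beta-r").length = 0 := by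
            simp; omega
          rw [hk0]
          rfl
    · -- j in the tail handled by the recursive call
      rw [pvGetD_append_right _ _ _ _ (by rw [hheadlen]; omega)]
      rw [hheadlen]
      have hxlen : j ≤ xs.length := by simp at hj; omega
      have hjr0 : r ≤ j := by omega
      have hrest : j - r < (List.drop (r-1) xs).length := by simp; omega
      rw [ih (j - r) hrest]
      have hget : ∀ k, ((List.drop (r-1) xs).getD k "") = ((x :: xs).getD (r + k) "") := by
        intro k
        rw [pvGetD_drop]
        have hre : r - 1 + k = (r + k) - 1 := by omega
        rw [hre]
        have : r + k = ((r + k) - 1) + 1 := by omega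
        rw [this, List.getD_cons_succ]
        simp
      have hg0 : (List.drop (r-1) xs).getD (j-r) "" = (x :: xs).getD j "" := by
        rw [hget]; congr 1; omega
      by_cases hb : isBcls ((x :: xs).getD j "") = true
      · have hjr' : r < j := by
          rcases Nat.lt_or_ge r j with h' | h'
          · exact h'
          · have hjr2 : j = r := by omega
            rw [hjr2] at hb
            rw [hstop (by simp; omega)] at hb
            exact absurd hb (by simp)
        have hgL : (List.drop (r-1) xs).getD (j-r-1) "" = (x :: xs).getD (j-1) "" := by
          rw [hget]; congr 1; omega
        have hgR : (List.drop (r-1) xs).getD (j-r+1) "" = (x :: xs).getD (j+1) "" := by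
          rw [hget]; congr 1; omega
        have hlen2 : decide (j - r + 1 < (List.drop (r-1) xs).length) =
            decide (j + 1 < (x :: xs).length) := by
          simp only [List.length_drop, List.length_cons]
          exact decide_eq_decide.mpr (by omega)
        have hd0 : decide (0 < j - r) = decide (0 < j) :=
          decide_eq_decide.mpr (by omega)
        rw [hg0, hgL, hgR, hlen2, hd0]
      · rw [hg0]
        rw [if_neg hb, if_neg hb]
  | case3 x xs h ih =>
    rw [altGo, if_neg h]
    have h0 : isBcls x = false := by simpa using h
    cases j with
    | zero => simp [h0]
    | succ k =>
      rw [List.getD_cons_succ]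
      have hk : k < xs.length := by simpa using hj
      rw [ih k hk]
      by_cases hb : isBcls (xs.getD k "") = true
      · have hb' : isBcls ((x :: xs).getD (k+1) "") = true := by
          rw [List.getD_cons_succ]; exact hb
        rw [if_pos hb, if_pos hb']
        have hR : isBcls ((x :: xs).getD (k+1+1) "") = isBcls (xs.getD (k+1) "") := by
          rw [List.getD_cons_succ]
        have hlen : decide (k+1 < xs.length) = decide (k+1+1 < (x :: xs).length) :=
          decide_eq_decide.mpr (by simp)
        cases k with
        | zero => simp [h0]
        | succ m =>
          have e0 : m + 1 - 1 = m := rfl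
          have e1 : m + 1 + 1 - 1 = m + 1 := rfl
          rw [e0, e1, List.getD_cons_succ, hlen, hR]
          have e2 : (decide (0 < m+1) : Bool) = true := by simp
          have e3 : (decide (0 < m+1+1) : Bool) = true := by simp
          rw [e2, e3]
      · have hb' : isBcls ((x :: xs).getD (k+1) "") = false := by
          rw [List.getD_cons_succ]; simpa using hb
        have hb2 : isBcls (xs.getD k "") = false := by simpa using hb
        rw [if_neg (ne_true_of_eq_false hb2), if_neg (ne_true_of_eq_false hb'), List.getD_cons_succ]

-- the mapped list with A's sentinel
def mmL (lst : List String) : List String := lst.map fA ++ ["."]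

-- 'position j of the mapped+sentinel list holds "Beta-d"'
def clsB (lst : List String) (j : Nat) : Bool := (mmL lst).getD j "" == "Beta-d"

-- A's count_b at the start of iteration i (length of the b-run ending just before i)
def rC (lst : List String) : Nat → Nat
  | 0 => 0
  | i+1 => if clsB lst i then rC lst i + 1 else 0

theorem fA_isB (x : String) : (fA x == "Beta-d") = isBcls x := by
  by_cases hx : x = "Beta-sheet" <;> simp [fA, isBcls, hx]

theorem fA_of_not (x : String) (hx : isBcls x = false) : fA x = x := by
  simp [isBcls] at hx
  simp [fA, hx]

theorem mmL_length (lst : List String) : (mmL lst).length = lst.length + 1 := by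
  simp [mmL]

theorem mm_getD_lt (lst : List String) (j : Nat) (hj : j < lst.length) :
    (mmL lst).getD j "" = fA (lst.getD j "") := by
  unfold mmL
  rw [pvGetD_append_left _ _ _ _ (by simpa using hj)]
  rw [List.getD_eq_getElem _ _ (by simpa using hj), List.getD_eq_getElem _ _ hj]
  simp

theorem cls_lt (lst : List String) (j : Nat) (hj : j < lst.length) :
    clsB lst j = isBcls (lst.getD j "") := by
  unfold clsB
  rw [mm_getD_lt lst j hj, fA_isB]

theorem mm_getD_len (lst : List String) : (mmL lst).getD lst.length "" = "." := by
  unfold mmL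
  rw [pvGetD_append_right _ _ _ _ (by simp)]
  simp

theorem cls_ge (lst : List String) (j : Nat) (hj : lst.length ≤ j) : clsB lst j = false := by
  unfold clsB
  rcases eq_or_lt_of_le hj with h' | h'
  · rw [← h', mm_getD_len]
    decide
  · rw [pvGetD_ge _ _ _ (by rw [mmL_length]; omega)]
    decide

-- the target: B's output with the sentinel appended, read pointwise
theorem T_getD (lst : List String) (j : Nat) (hj : j < lst.length) :
    (altGo lst ++ ["."]).getD j "" =
      if clsB lst j then
        (if decide (0 < j) && clsB lst (j-1) && clsB lst (j+1) then "Beta-r" else "Beta-d")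
      else (mmL lst).getD j "" := by
  rw [pvGetD_append_left _ _ _ _ (by rw [altGo_length]; exact hj)]
  rw [altGo_getD lst j hj]
  rw [cls_lt lst j hj, mm_getD_lt lst j hj]
  by_cases hb : isBcls (lst.getD j "") = true
  · rw [if_pos hb, if_pos hb]
    have hL : clsB lst (j-1) = isBcls (lst.getD (j-1) "") := cls_lt lst (j-1) (by omega)
    by_cases hj1 : j + 1 < lst.length
    · rw [cls_lt lst (j+1) hj1, hL, decide_eq_true hj1]
      simp
    · rw [cls_ge lst (j+1) (by omega), decide_eq_false hj1, hL]
      simp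
  · rw [if_neg hb]
    have hb2 : isBcls (lst.getD j "") = false := by simpa using hb
    rw [fA_of_not _ hb2, if_neg hb]

theorem rC_le (lst : List String) (i : Nat) : rC lst i ≤ i := by
  induction i with
  | zero => simp [rC]
  | succ i ih =>
    by_cases h : clsB lst i <;> simp [rC, h] <;> omega

theorem rC_run (lst : List String) (i : Nat) :
    ∀ j, i - rC lst i ≤ j → j < i → clsB lst j = true := by
  induction i with
  | zero => omega
  | succ i ih =>
    intro j h1 h2
    by_cases h : clsB lst i
    · simp only [rC, h, if_true] at h1
      rcases Nat.lt_or_ge j i with h' | h'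
      · exact ih j (by have := rC_le lst i; omega) h'
      · have : j = i := by omega
        rw [this]; exact h
    · have h' : clsB lst i = false := by simpa using h
      simp [rC, h'] at h1
      omega

theorem rC_max (lst : List String) (i : Nat) :
    i - rC lst i = 0 ∨ clsB lst (i - rC lst i - 1) = false := by
  induction i with
  | zero => left; rfl
  | succ i ih =>
    by_cases h : clsB lst i
    · have he : i + 1 - rC lst (i+1) = i - rC lst i := by
        simp only [rC, h, if_true]
        have := rC_le lst i
        omega
      rw [he]
      exact ih
    · right
      have h' : clsB lst i = false := by simpa using h
      simp [rC, h']

-- the loop invariant: after i iterations the prefix strictly before the pending run is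
-- already B's output, the pending run still holds 'Beta-d', and everything from i on is untouched
def InvP (lst : List String) (i : Nat) (st : List String × Int) : Prop :=
  st.1.length = lst.length + 1 ∧
  (∀ j : Nat, i ≤ j → st.1.getD j "" = (mmL lst).getD j "") ∧
  (if clsB lst i then
      st.2 = (rC lst i : Int) ∧
      (∀ j : Nat, j < i - rC lst i → st.1.getD j "" = (altGo lst ++ ["."]).getD j "") ∧
      (∀ j : Nat, i - rC lst i ≤ j → j < i → st.1.getD j "" = "Beta-d")
    else
      (∀ j : Nat, j < i → st.1.getD j "" = (altGo lst ++ ["."]).getD j ""))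

theorem inv_step (lst : List String) (i : Nat) (st : List String × Int)
    (hi : i < lst.length) (h : InvP lst i st) : InvP lst (i+1) (stepA st (i : Int)) := by
  obtain ⟨h1, h2, h3⟩ := h
  have hgi : st.1.getD i "" = (mmL lst).getD i "" := h2 i le_rfl
  have hgi1 : st.1.getD (i+1) "" = (mmL lst).getD (i+1) "" := h2 (i+1) (by omega)
  have hc : (PySem.List.pyGetD st.1 (i : Int) "" == "Beta-d") = clsB lst i := by
    rw [PySem.List.pyGetD_natCast, hgi]; rfl
  have hc1 : (PySem.List.pyGetD st.1 ((i : Int) + 1) "" == "Beta-d") = clsB lst (i+1) := by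
    have e : (i : Int) + 1 = ((i + 1 : Nat) : Int) := by push_cast; ring
    rw [e, PySem.List.pyGetD_natCast, hgi1]; rfl
  by_cases hci : clsB lst i = true
  · rw [if_pos hci] at h3
    obtain ⟨hcb, hpre, hrun⟩ := h3
    have hmd : (mmL lst).getD i "" = "Beta-d" := by
      have := hci; unfold clsB at this; simpa using this
    have hstepA : stepA st (i : Int) =
        (if (decide (st.2 + 1 > 2) && !(clsB lst (i+1))) = true then
           (setSlice st.1 ((i : Int) - (st.2 + 1) + 2) (i : Int)
              (List.replicate (((i : Int) - ((i : Int) - (st.2 + 1) + 2)).toNat) "Beta-r"), 0)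
         else (st.1, st.2 + 1)) := by
      simp only [stepA]
      rw [hc, if_pos hci, hc1]
    have hcle := rC_le lst i
    by_cases hfl : (decide (st.2 + 1 > 2) && !(clsB lst (i+1))) = true
    · -- flush: the run that ends at i is rewritten
      rw [hstepA, if_pos hfl]
      simp only [Bool.and_eq_true, decide_eq_true_eq, Bool.not_eq_true'] at hfl
      obtain ⟨hgt, hcf⟩ := hfl
      have hc2 : 2 ≤ rC lst i := by rw [hcb] at hgt; omega
      have e1 : (i : Int) - (st.2 + 1) + 2 = ((i - rC lst i + 1 : Nat) : Int) := by
        rw [hcb]; omega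
      rw [e1]
      have e2 : ((i : Int) - ((i - rC lst i + 1 : Nat) : Int)).toNat = rC lst i - 1 := by
        omega
      rw [e2]
      have hss : setSlice st.1 ((i - rC lst i + 1 : Nat) : Int) ((i : Nat) : Int)
          (List.replicate (rC lst i - 1) "Beta-r")
          = st.1.take (i - rC lst i + 1) ++ List.replicate (rC lst i - 1) "Beta-r" ++ st.1.drop i := by
        unfold setSlice
        rw [PySem.List.clampIdx_natCast, PySem.List.clampIdx_natCast, h1]
        have e3 : min (i - rC lst i + 1) (lst.length + 1) = i - rC lst i + 1 := by omega
        rw [e3]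
        have e4 : max (i - rC lst i + 1) (min i (lst.length + 1)) = i := by omega
        simp only [e4]
      rw [hss]
      have hlen12 : (st.1.take (i - rC lst i + 1) ++ List.replicate (rC lst i - 1) "Beta-r").length = i := by
        simp [h1]; omega
      refine ⟨?_, ?_, ?_⟩
      · simp [h1]; omega
      · intro j hj
        rw [pvGetD_append_right _ _ _ _ (by rw [hlen12]; omega), hlen12, pvGetD_drop]
        have e5 : i + (j - i) = j := by omega
        rw [e5]
        exact h2 j (by omega)
      · have hcf' : clsB lst (i+1) = false := hcf
        rw [if_neg (ne_true_of_eq_false hcf')]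
        intro j hj
        rcases Nat.lt_or_ge j (i - rC lst i + 1) with hj1 | hj1
        · -- untouched prefix, including the run's first element
          rw [pvGetD_append_left _ _ _ _ (by rw [hlen12]; omega),
              pvGetD_append_left _ _ _ _ (by simp [h1]; omega),
              pvGetD_take _ _ _ _ hj1]
          rcases Nat.lt_or_ge j (i - rC lst i) with hj2 | hj2
          · exact hpre j hj2
          · have hj3 : j = i - rC lst i := by omega
            rw [hj3, hrun (i - rC lst i) le_rfl (by omega)]
            rw [T_getD lst _ (by omega)]
            rw [if_pos (rC_run lst i _ le_rfl (by omega))]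
            rcases rC_max lst i with hm | hm
            · rw [hm]; simp
            · rw [hm]; simp
        · rcases Nat.lt_or_ge j i with hj2 | hj2
          · -- rewritten interior
            rw [pvGetD_append_left _ _ _ _ (by rw [hlen12]; omega),
                pvGetD_append_right _ _ _ _ (by simp [h1]; omega)]
            have e6 : j - (st.1.take (i - rC lst i + 1)).length < rC lst i - 1 := by
              simp [h1]; omega
            rw [pvGetD_replicate _ _ _ _ e6]
            rw [T_getD lst _ (by omega)]
            rw [if_pos (rC_run lst i _ (by omega) hj2)]
            have hl : clsB lst (j-1) = true := rC_run lst i _ (by omega) (by omega)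
            have hr : clsB lst (j+1) = true := by
              rcases Nat.lt_or_ge (j+1) i with hj3 | hj3
              · exact rC_run lst i _ (by omega) hj3
              · have : j + 1 = i := by omega
                rw [this]; exact hci
            rw [hl, hr]
            simp [show 0 < j by omega]
          · -- j = i : the run's last element stays 'Beta-d'
            have hj3 : j = i := by omega
            rw [hj3]
            rw [pvGetD_append_right _ _ _ _ (by rw [hlen12]),
                hlen12, Nat.sub_self, pvGetD_drop, Nat.add_zero, hgi, hmd]
            rw [T_getD lst _ hi, if_pos hci, hcf']
            simp
    · -- no flush: just count
      rw [hstepA, if_neg hfl]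
      refine ⟨h1, fun j hj => h2 j (by omega), ?_⟩
      by_cases hci1 : clsB lst (i+1) = true
      · rw [if_pos hci1]
        have hrc1 : rC lst (i+1) = rC lst i + 1 := by simp [rC, hci]
        refine ⟨by rw [hcb, hrc1]; push_cast; ring, ?_, ?_⟩
        · intro j hj
          exact hpre j (by rw [hrc1] at hj; omega)
        · intro j hj1 hj2
          rcases Nat.lt_or_ge j i with hj3 | hj3
          · exact hrun j (by rw [hrc1] at hj1; omega) hj3
          · have : j = i := by omega
            rw [this, hgi, hmd]
      · rw [if_neg hci1]
        have hcf' : clsB lst (i+1) = false := by simpa using hci1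
        have hsmall : rC lst i ≤ 1 := by
          simp only [Bool.and_eq_true, decide_eq_true_eq, Bool.not_eq_true'] at hfl
          rw [hcb] at hfl
          have := hfl
          by_contra hcon
          exact this ⟨by omega, hcf'⟩
        intro j hj
        rcases Nat.lt_or_ge j (i - rC lst i) with hj1 | hj1
        · exact hpre j hj1
        · rcases Nat.lt_or_ge j i with hj2 | hj2
          · -- the run has length 1 and j is its only, boundary element
            rw [hrun j hj1 hj2]
            rw [T_getD lst _ (by omega)]
            rw [if_pos (rC_run lst i _ hj1 hj2)]
            have hj3 : j = i - 1 ∧ rC lst i = 1 := by omega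
            rcases rC_max lst i with hm | hm
            · have : j = 0 := by omega
              rw [this]; simp
            · have : clsB lst (j-1) = false := by
                have e : j - 1 = i - rC lst i - 1 := by omega
                rw [e]; exact hm
              rw [this]; simp
          · have hj3 : j = i := by omega
            rw [hj3, hgi, hmd]
            rw [T_getD lst _ hi, if_pos hci, hcf']
            simp
  · -- not in a run: reset
    have hstepA : stepA st (i : Int) = (st.1, 0) := by
      simp only [stepA]
      rw [hc, if_neg hci]
    rw [hstepA]
    rw [if_neg hci] at h3
    have hcf : clsB lst i = false := by simpa using hci
    have hT_i : st.1.getD i "" = (altGo lst ++ ["."]).getD i "" := by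
      rw [T_getD lst _ hi, if_neg hci, hgi]
    refine ⟨h1, fun j hj => h2 j (by omega), ?_⟩
    have hall : ∀ j : Nat, j < i + 1 → st.1.getD j "" = (altGo lst ++ ["."]).getD j "" := by
      intro j hj
      rcases Nat.lt_or_ge j i with hj1 | hj1
      · exact h3 j hj1
      · have : j = i := by omega
        rw [this]; exact hT_i
    by_cases hci1 : clsB lst (i+1) = true
    · rw [if_pos hci1]
      have hrc1 : rC lst (i+1) = 0 := by simp [rC, hcf]
      refine ⟨by rw [hrc1]; rfl, ?_, ?_⟩
      · intro j hj
        exact hall j (by omega)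
      · intro j hj1 hj2
        rw [hrc1] at hj1
        omega
    · rw [if_neg hci1]
      exact hall

-- A's loop, run for k iterations
def loopSt (lst : List String) (k : Nat) : List String × Int :=
  (List.range k).foldl (fun st (j : Nat) => stepA st (j : Int)) (mmL lst, 0)

theorem loop_inv (lst : List String) : ∀ k, k ≤ lst.length → InvP lst k (loopSt lst k) := by
  intro k
  induction k with
  | zero =>
    intro _
    refine ⟨mmL_length lst, fun j _ => rfl, ?_⟩
    by_cases hc : clsB lst 0 = true
    · rw [if_pos hc]
      exact ⟨rfl, by omega, by omega⟩
    · rw [if_neg hc]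
      omega
  | succ k ih =>
    intro hk
    have e : loopSt lst (k+1) = stepA (loopSt lst k) (k : Int) := by
      unfold loopSt
      rw [List.range_succ, List.foldl_append]
      rfl
    rw [e]
    exact inv_step lst k _ (by omega) (ih (by omega))

theorem split_eq (lst : List String) : split_beta_sheet lst = split_beta_sheet_alt lst := by
  simp only [split_beta_sheet, split_beta_sheet_alt]
  have hlen : ((lst.map fA ++ ["."]).length : Int) - 1 = ((lst.length : Nat) : Int) := by
    simp
  rw [hlen, PySem.List.pyRange_zero_natCast, List.foldl_map]
  have hfold : (List.range lst.length).foldl (fun st (j : Nat) => stepA st (j : Int))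
      (lst.map fA ++ ["."], (0 : Int)) = loopSt lst lst.length := rfl
  rw [hfold]
  obtain ⟨hL1, hL2, hL3⟩ := loop_inv lst lst.length le_rfl
  rw [if_neg (ne_true_of_eq_false (cls_ge lst lst.length le_rfl))] at hL3
  have hTlen : (altGo lst ++ ["."]).length = lst.length + 1 := by
    simp [altGo_length]
  have hLT : (loopSt lst lst.length).1 = altGo lst ++ ["."] := by
    apply List.ext_getElem (by rw [hL1, hTlen])
    intro n hn1 hn2
    rw [← List.getD_eq_getElem _ "" hn1, ← List.getD_eq_getElem _ "" hn2]
    rcases Nat.lt_or_ge n lst.length with hn | hn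
    · exact hL3 n hn
    · have hn' : n = lst.length := by rw [hL1] at hn1; omega
      rw [hn', hL2 lst.length le_rfl, mm_getD_len]
      rw [pvGetD_append_right _ _ _ _ (by rw [altGo_length])]
      simp [altGo_length]
  rw [hLT, PySem.List.slice_to_neg_one]
  simp

-- ===== VERDICT (by name: the statement is the Claim_ definition above) =====
theorem split_beta_sheet_spec : Claim_equal_split_beta_sheet := by
  intro lst _
  unfold Spec_split_beta_sheet
  exact split_eq lst
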